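-- pv_equiv track=rewrite | github.com/taddyb33/t-route-dev | src/python_framework_v02/troute/nhd_network.py | separate_waterbodies
-- ===== SOURCE A (Python) =====
-- from collections import defaultdict, Counter, deque
-- from itertools import chain
--
-- def nodes(N):
--     yield from N.keys() | (v for v in chain.from_iterable(N.values()) if v not in N)
--
-- def reverse_surjective_mapping(d):
--     rd = defaultdict(list)
--     for src, dst in d.items():
--         rd[dst].append(src)
--     rd.default_factory = None
--     return rd
--
-- def separate_waterbodies(connections, waterbodies):
--     waterbody_nodes = {}
--     for wb, nodes in reverse_surjective_mapping(waterbodies).items():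
--         waterbody_nodes[wb] = net = {}
--         for n in nodes:
--             if n in connections:
--                 net[n] = list(filter(waterbodies.__contains__, connections[n]))
--     return waterbody_nodes
-- ===== SOURCE B (Python) =====
-- def separate_waterbodies(connections, waterbodies):
--     order = list(dict.fromkeys(waterbodies.values()))
--     return {
--         wb: {n: [c for c in connections[n] if c in waterbodies]
--              for n, w in waterbodies.items() if w == wb and n in connections}
--         for wb in order
--     }
-- ===== Notes on version B (the rewrite author's own statement) =====
-- stated objective: alternative
-- what changed: B drops A's reverse_surjective_mapping index entirely: it lists the distinct waterbody ids in first-appearance order (dict.fromkeys) and builds each group by a comprehension over waterbodies.items() filtered to that id, trading A's linear index pass for a per-waterbody rescan.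
import Mathlib
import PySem

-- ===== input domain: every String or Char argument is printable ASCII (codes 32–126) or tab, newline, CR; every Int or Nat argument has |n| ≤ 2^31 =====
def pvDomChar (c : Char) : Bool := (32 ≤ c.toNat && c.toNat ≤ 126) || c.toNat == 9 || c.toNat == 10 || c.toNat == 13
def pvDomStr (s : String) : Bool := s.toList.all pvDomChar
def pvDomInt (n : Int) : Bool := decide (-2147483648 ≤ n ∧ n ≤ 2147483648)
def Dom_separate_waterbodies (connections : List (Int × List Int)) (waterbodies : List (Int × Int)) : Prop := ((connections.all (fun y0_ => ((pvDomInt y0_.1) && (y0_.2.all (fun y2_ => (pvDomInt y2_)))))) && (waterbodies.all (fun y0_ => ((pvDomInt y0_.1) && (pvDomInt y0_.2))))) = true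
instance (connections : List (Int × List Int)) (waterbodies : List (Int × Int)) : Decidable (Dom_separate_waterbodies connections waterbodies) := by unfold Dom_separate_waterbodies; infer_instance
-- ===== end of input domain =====

-- B drops A's reverse_surjective_mapping index: it enumerates the distinct waterbody ids
-- in first-appearance order and builds each group by rescanning waterbodies.items()
-- (objective: alternative decomposition; same return value).

-- ===== PORT A =====
-- helper: defaultdict(list) reversal, rd[dst].append(src)
def reverse_surjective_mapping (d : List (Int × Int)) : PySem.Dict Int (List Int) :=
  d.foldl (fun rd p => rd.modify p.2 [] (· ++ [p.1])) PySem.Dict.empty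

def separate_waterbodies (connections : List (Int × List Int)) (waterbodies : List (Int × Int)) : List (Int × List (Int × List Int)) :=
  let connD : PySem.Dict Int (List Int) := PySem.Dict.mk connections
  let wbD : PySem.Dict Int Int := PySem.Dict.mk waterbodies
  let waterbody_nodes : PySem.Dict Int (PySem.Dict Int (List Int)) :=
    (reverse_surjective_mapping waterbodies).items.foldl
      (fun out p =>
        let net : PySem.Dict Int (List Int) :=
          p.2.foldl
            (fun net n =>
              if connD.contains n then
                net.insert n ((connD.getD n []).filter (fun c => wbD.contains c))
              else net)
            PySem.Dict.empty
        out.insert p.1 net)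
      PySem.Dict.empty
  waterbody_nodes.items.map (fun q => (q.1, q.2.items))

-- ===== PORT B =====
def separate_waterbodies_alt (connections : List (Int × List Int)) (waterbodies : List (Int × Int)) : List (Int × List (Int × List Int)) :=
  let connD : PySem.Dict Int (List Int) := PySem.Dict.mk connections
  let wbD : PySem.Dict Int Int := PySem.Dict.mk waterbodies
  -- order = list(dict.fromkeys(waterbodies.values()))
  let order : List Int := PySem.List.dedup (waterbodies.map (fun p => p.2))
  -- outer dict comprehension over the (distinct) ids of order = the association list itself;
  -- inner dict comprehension ported as a fold of inserts over waterbodies.items()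
  order.map (fun wb =>
    (wb,
      (waterbodies.foldl
        (fun net p =>
          if p.2 == wb && connD.contains p.1 then
            net.insert p.1 ((connD.getD p.1 []).filter (fun c => wbD.contains c))
          else net)
        (PySem.Dict.empty : PySem.Dict Int (List Int))).items))

-- ===== PRECONDITION & SPEC =====
def Spec_separate_waterbodies (connections : List (Int × List Int)) (waterbodies : List (Int × Int)) (out : List (Int × List (Int × List Int))) : Prop := out = separate_waterbodies_alt connections waterbodies
instance (connections : List (Int × List Int)) (waterbodies : List (Int × Int)) (out : List (Int × List (Int × List Int))) : Decidable (Spec_separate_waterbodies connections waterbodies out) := by unfold Spec_separate_waterbodies; infer_instance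

-- ===== CLAIM (what is proved, stated in full; the proofs are below) =====
def Claim_equal_separate_waterbodies : Prop := ∀ (connections : List (Int × List Int)) (waterbodies : List (Int × Int)), Dom_separate_waterbodies connections waterbodies → Spec_separate_waterbodies connections waterbodies (separate_waterbodies connections waterbodies)

-- ===== LEMMAS AND PROOFS =====

-- A's inner-loop step and dict
def pvNetF (connD : PySem.Dict Int (List Int)) (wbD : PySem.Dict Int Int) : PySem.Dict Int (List Int) → Int → PySem.Dict Int (List Int) :=
  fun net n =>
    if connD.contains n then
      net.insert n ((connD.getD n []).filter (fun c => wbD.contains c))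
    else net

-- B's inner fold over waterbodies filtered to one id = A's inner fold over the member list
theorem pvInnerB (connD : PySem.Dict Int (List Int)) (wbD : PySem.Dict Int Int) (wb : Int) (l : List (Int × Int)) (net0 : PySem.Dict Int (List Int)) :
    l.foldl
      (fun net p =>
        if p.2 == wb && connD.contains p.1 then
          net.insert p.1 ((connD.getD p.1 []).filter (fun c => wbD.contains c))
        else net)
      net0
    = ((l.filter (fun p => p.2 == wb)).map (fun p => p.1)).foldl (pvNetF connD wbD) net0 := by
  induction l generalizing net0 with
  | nil => rfl
  | cons p l ih =>
    simp only [List.foldl_cons, List.filter_cons]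
    by_cases hw : (p.2 == wb) = true
    · rw [if_pos hw]
      simp only [List.map_cons, List.foldl_cons]
      by_cases hc : connD.contains p.1 = true
      · rw [if_pos (by simp [hw, hc]), ih]
        congr 1
        simp [pvNetF, hc]
      · rw [if_neg (by simp [hc]), ih]
        congr 1
        simp [pvNetF, hc]
    · rw [if_neg hw, if_neg (by simp_all)]
      exact ih net0

theorem rsm_nodup (waterbodies : List (Int × Int)) : (reverse_surjective_mapping waterbodies).keys.Nodup := by
  have := PySem.Dict.nodup_keys_foldl_modify_key waterbodies (fun q : Int × Int => q.2)
    [] (fun _ q => (· ++ [q.1])) PySem.Dict.empty PySem.Dict.nodup_keys_empty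
  simpa [reverse_surjective_mapping] using this

theorem rsm_keys (waterbodies : List (Int × Int)) :
    (reverse_surjective_mapping waterbodies).keys = PySem.List.dedup (waterbodies.map (fun p => p.2)) := by
  have := PySem.Dict.keys_foldl_modify_key waterbodies (fun q : Int × Int => q.2)
    [] (fun _ q => (· ++ [q.1])) PySem.Dict.empty
  simpa [reverse_surjective_mapping, PySem.Dict.keys_empty, PySem.Set.update] using this

theorem rsm_getD (waterbodies : List (Int × Int)) (wb : Int) :
    (reverse_surjective_mapping waterbodies).getD wb []
      = (waterbodies.filter (fun p => p.2 == wb)).map (fun p => p.1) := by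
  have hmap : reverse_surjective_mapping waterbodies
      = (waterbodies.map Prod.swap).foldl (fun rd p => rd.modify p.1 [] (· ++ [p.2])) PySem.Dict.empty := by
    rw [List.foldl_map]; rfl
  rw [hmap, PySem.Dict.getD_foldl_modify_append]
  simp [List.filter_map, Function.comp_def]

-- ===== VERDICT (by name: the statement is the Claim_ definition above) =====
theorem separate_waterbodies_spec : Claim_equal_separate_waterbodies := by
  intro connections waterbodies _
  unfold Spec_separate_waterbodies separate_waterbodies separate_waterbodies_alt
  simp only []
  set connD : PySem.Dict Int (List Int) := PySem.Dict.mk connections with hconnD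
  set wbD : PySem.Dict Int Int := PySem.Dict.mk waterbodies with hwbD
  set rsm := reverse_surjective_mapping waterbodies with hrsm
  -- A's outer loop inserts fresh, distinct keys: its items are a map over rsm.items
  have houter : (rsm.items.foldl
      (fun out (p : Int × List Int) =>
        out.insert p.1
          (p.2.foldl (fun net n =>
              if connD.contains n then
                net.insert n ((connD.getD n []).filter (fun c => wbD.contains c))
              else net)
            PySem.Dict.empty))
      (PySem.Dict.empty : PySem.Dict Int (PySem.Dict Int (List Int)))).items
      = rsm.items.map (fun p => (p.1, (p.2.foldl (pvNetF connD wbD) PySem.Dict.empty))) := by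
    have h := PySem.Dict.items_foldl_insert_fresh rsm.items (fun p : Int × List Int => p.1)
      (fun p => p.2.foldl (pvNetF connD wbD) PySem.Dict.empty)
      (PySem.Dict.empty : PySem.Dict Int (PySem.Dict Int (List Int)))
      (fun a _ => by simp) (by simpa [PySem.Dict.keys] using rsm_nodup waterbodies)
    simpa [PySem.Dict.empty, pvNetF] using h
  rw [houter]
  have hitems : rsm.items = rsm.keys.map (fun k => (k, rsm.getD k [])) :=
    PySem.Dict.items_eq_map_keys rsm (rsm_nodup waterbodies) []
  rw [hitems, rsm_keys]
  simp only [List.map_map, Function.comp_def]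
  apply List.map_congr_left
  intro wb _
  rw [pvInnerB, hrsm, rsm_getD]
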